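-- pv_equiv track=rewrite | github.com/wellingtonsilverio/signature-image | Assinatura.py | createPath
-- ===== SOURCE A (Python) =====
-- def createPath(output):
--     path = output.split('/')[:-1]
--     newPath = ""
--     for route in path:
--         if route == '':
--             newPath += "/"
--         else:
--             newPath += route + "/"
--
--     return newPath
-- ===== SOURCE B (Python) =====
-- def createPath(output):
--     return output[:output.rfind('/') + 1]
-- ===== Notes on version B (the rewrite author's own statement) =====
-- stated objective: simpler
-- what changed: B replaces A's split-into-parts-and-rejoin loop with a single rfind for the last '/' and one slice up to and including it (rfind returning -1 yields the empty slice).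
import Mathlib
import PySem

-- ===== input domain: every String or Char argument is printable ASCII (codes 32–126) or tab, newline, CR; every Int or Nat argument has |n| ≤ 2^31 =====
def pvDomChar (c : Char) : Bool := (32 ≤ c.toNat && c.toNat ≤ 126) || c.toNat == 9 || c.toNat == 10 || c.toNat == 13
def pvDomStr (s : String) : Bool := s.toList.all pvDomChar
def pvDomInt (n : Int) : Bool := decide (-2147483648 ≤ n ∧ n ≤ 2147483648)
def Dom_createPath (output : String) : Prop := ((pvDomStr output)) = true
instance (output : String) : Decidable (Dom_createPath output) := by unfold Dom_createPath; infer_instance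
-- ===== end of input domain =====

-- B replaces A's split-and-rejoin loop with a single rfind of the last '/' and one slice; equivalence of the two is proved below.

-- ===== PORT A =====
-- A, step for step over the code points: split on '/', drop the last piece ([:-1]),
-- then fold the pieces appending "/" for an empty piece and piece+"/" otherwise.
def createPath (output : String) : String :=
  let path := PySem.List.slice ((PySem.Chars.split? output.toList ['/']).getD []) none (some (-1))
  let newPath := path.foldl
    (fun acc route => if route = ([] : List Char) then acc ++ ['/'] else acc ++ (route ++ ['/'])) []
  String.ofList newPath

-- ===== PORT B =====
-- B: output[:output.rfind('/') + 1]
def createPath_alt (output : String) : String :=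
  String.ofList (PySem.List.slice output.toList none (some (PySem.Chars.rfind output.toList ['/'] + 1)))

-- ===== PRECONDITION & SPEC =====
def Spec_createPath (output : String) (out : String) : Prop := out = createPath_alt output
instance (output : String) (out : String) : Decidable (Spec_createPath output out) := by unfold Spec_createPath; infer_instance

-- ===== CLAIM (what is proved, stated in full; the proofs are below) =====
def Claim_equal_createPath : Prop := ∀ (output : String), Dom_createPath output → Spec_createPath output (createPath output)

-- ===== LEMMAS AND PROOFS =====

-- the common value: the prefix of cs up to and including the LAST '/', or [] if there is none
def pvLastPrefix (cs : List Char) : List Char := (cs.reverse.dropWhile (· ≠ '/')).reverse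

-- structural version of PySem.Chars.splitOn.go for the one-char separator '/'
def pvSplit1 (pre cs : List Char) : List (List Char) :=
  match cs with
  | [] => [pre]
  | c :: rest => if c = '/' then pre :: pvSplit1 [] rest else pvSplit1 (pre ++ [c]) rest

theorem pvSplit1_ne_nil (pre cs : List Char) : pvSplit1 pre cs ≠ [] := by
  induction cs generalizing pre with
  | nil => simp [pvSplit1]
  | cons c rest ih => by_cases h : c = '/' <;> simp [pvSplit1, h, ih]

theorem pvGo_eq_split1 (fuel : Nat) (l cur : List Char) (acc : List (List Char))
    (h : l.length ≤ fuel) :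
    PySem.Chars.splitOn.go ['/'] fuel l cur acc = acc.reverse ++ pvSplit1 cur.reverse l := by
  induction fuel generalizing l cur acc with
  | zero =>
      have hl : l = [] := List.eq_nil_of_length_eq_zero (Nat.le_zero.mp h)
      subst hl
      simp [PySem.Chars.splitOn.go, pvSplit1]
  | succ fuel ih =>
      cases l with
      | nil => simp [PySem.Chars.splitOn.go, pvSplit1]
      | cons c rest =>
          by_cases hc : c = '/'
          · subst hc
            have hpre : (['/'] : List Char).isPrefixOf ('/' :: rest) = true := by
              simp [List.isPrefixOf]
            simp only [PySem.Chars.splitOn.go, hpre, if_true]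
            rw [ih _ _ _ (by simpa using Nat.le_of_succ_le_succ h)]
            simp [pvSplit1]
          · have hpre : (['/'] : List Char).isPrefixOf (c :: rest) = false := by
              simp [List.isPrefixOf]
              intro h'; exact absurd h'.symm hc
            simp only [PySem.Chars.splitOn.go, hpre, Bool.false_eq_true, if_false]
            rw [ih _ _ _ (by simpa using Nat.le_of_succ_le_succ h)]
            simp [pvSplit1, hc]

theorem pvSplitOn_eq (cs : List Char) : PySem.Chars.splitOn cs ['/'] = pvSplit1 [] cs := by
  have := pvGo_eq_split1 (cs.length + 1) cs [] [] (by omega)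
  simpa [PySem.Chars.splitOn] using this

theorem pvFold_eq_flatten (parts : List (List Char)) (acc : List Char) :
    parts.foldl (fun acc route => if route = ([] : List Char) then acc ++ ['/'] else acc ++ (route ++ ['/'])) acc
      = acc ++ (parts.map (· ++ ['/'])).flatten := by
  induction parts generalizing acc with
  | nil => simp
  | cons p ps ih =>
      by_cases h : p = ([] : List Char) <;> simp [List.foldl, h, ih]

theorem pvLastPrefix_eq_nil (cs : List Char) (h : '/' ∉ cs) : pvLastPrefix cs = [] := by
  unfold pvLastPrefix
  rw [List.dropWhile_eq_nil_iff.mpr, List.reverse_nil]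
  intro x hx
  simp only [decide_eq_true_eq]
  intro hx'
  exact h (by simpa [hx'] using List.mem_reverse.mp hx)

theorem pvLastPrefix_append_slash (t : List Char) :
    pvLastPrefix (t ++ ['/']) = t ++ ['/'] := by
  simp [pvLastPrefix]

theorem pvLastPrefix_append_of_ne (t : List Char) (c : Char) (hc : c ≠ '/') :
    pvLastPrefix (t ++ [c]) = pvLastPrefix t := by
  simp [pvLastPrefix, hc]

theorem pvLastPrefix_cons_of_mem (c : Char) (rest : List Char) (h : '/' ∈ rest) :
    pvLastPrefix (c :: rest) = c :: pvLastPrefix rest := by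
  unfold pvLastPrefix
  have hne : rest.reverse.dropWhile (· ≠ '/') ≠ [] := by
    intro hnil
    have := List.dropWhile_eq_nil_iff.mp hnil '/' (List.mem_reverse.mpr h)
    simp at this
  rw [List.reverse_cons, List.dropWhile_append]
  simp only [List.isEmpty_iff, if_neg hne]
  simp

theorem pvFlatten_split1 (pre cs : List Char) :
    ((pvSplit1 pre cs).dropLast.map (· ++ ['/'])).flatten
      = if '/' ∈ cs then pre ++ pvLastPrefix cs else [] := by
  induction cs generalizing pre with
  | nil => simp [pvSplit1]
  | cons c rest ih =>
      by_cases hc : c = '/'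
      · subst hc
        rw [pvSplit1, if_pos rfl,
          List.dropLast_cons_of_ne_nil (pvSplit1_ne_nil [] rest)]
        simp only [List.map_cons, List.flatten_cons, ih]
        by_cases hm : '/' ∈ rest
        · rw [if_pos hm, if_pos (List.mem_cons_self ..), pvLastPrefix_cons_of_mem _ _ hm]
          simp
        · rw [if_neg hm, if_pos (List.mem_cons_self ..)]
          have h2 : List.dropWhile (fun x => decide (x ≠ '/')) rest.reverse = [] := by
            rw [List.dropWhile_eq_nil_iff]
            intro x hx
            simp only [decide_eq_true_eq]
            intro he
            exact hm (he ▸ List.mem_reverse.mp hx)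
          unfold pvLastPrefix
          rw [List.reverse_cons, List.dropWhile_append, h2]
          simp [List.dropWhile]
      · rw [pvSplit1, if_neg hc, ih]
        by_cases hm : '/' ∈ rest
        · rw [if_pos hm, if_pos (by simp [hm]), pvLastPrefix_cons_of_mem _ _ hm]
          simp
        · have hnc : ¬ ('/' ∈ c :: rest) := by
            intro h
            rcases List.mem_cons.mp h with h | h
            · exact hc h.symm
            · exact hm h
          rw [if_neg hm, if_neg hnc]

theorem pvRfindGo_ge (s : List Char) (j : Nat) : -1 ≤ PySem.Chars.rfind.go s ['/'] j := by
  induction j with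
  | zero => rw [PySem.Chars.rfind.go]; split <;> omega
  | succ j ih => rw [PySem.Chars.rfind.go]; split; · omega
                 · exact ih

theorem pvPrefixOne (l : List Char) :
    (['/'] : List Char).isPrefixOf l = true ↔ l.head? = some '/' := by
  cases l with
  | nil => simp [List.isPrefixOf]
  | cons c rest =>
      by_cases hc : c = '/'
      · subst hc; simp [List.isPrefixOf]
      · simp [List.isPrefixOf, hc, Ne.symm hc]

theorem pvTake_rfindGo (s : List Char) (j : Nat) :
    s.take ((PySem.Chars.rfind.go s ['/'] j + 1).toNat) = pvLastPrefix (s.take (j + 1)) := by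
  induction j with
  | zero =>
      rw [PySem.Chars.rfind.go]
      cases s with
      | nil =>
          have h0 : (['/'] : List Char).isPrefixOf ([] : List Char) = false := rfl
          rw [h0]
          simp [pvLastPrefix]
      | cons c rest =>
          by_cases hc : c = '/'
          · subst hc
            rw [if_pos (by simp [List.isPrefixOf])]
            have := pvLastPrefix_append_slash ([] : List Char)
            simpa using this.symm
          · rw [if_neg (by simp [List.isPrefixOf]; exact fun h => absurd h.symm hc)]
            have := pvLastPrefix_append_of_ne [] c hc
            simp only [List.nil_append] at this
            simpa [pvLastPrefix] using this.symm
  | succ j ih =>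
      rw [PySem.Chars.rfind.go]
      by_cases hp : (['/'] : List Char).isPrefixOf (s.drop (j + 1)) = true
      · rw [if_pos hp]
        have hhead : (s.drop (j + 1)).head? = some '/' := (pvPrefixOne _).mp hp
        have hget : s[j + 1]? = some '/' := by
          rwa [List.head?_drop] at hhead
        have htake : s.take (j + 1 + 1) = s.take (j + 1) ++ ['/'] := by
          rw [List.take_add_one, hget]; rfl
        rw [htake, pvLastPrefix_append_slash]
        rw [show ((((j + 1 : Nat) : Int)) + 1).toNat = j + 1 + 1 by omega]
        exact htake
      · rw [if_neg hp, ih]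
        rcases hget : s[j + 1]? with _ | c
        · have : s.take (j + 1 + 1) = s.take (j + 1) := by
            rw [List.take_add_one, hget]; simp
          rw [this]
        · have hc : c ≠ '/' := by
            intro hc; subst hc
            exact hp ((pvPrefixOne _).mpr (by rwa [List.head?_drop]))
          have htake : s.take (j + 1 + 1) = s.take (j + 1) ++ [c] := by
            rw [List.take_add_one, hget]; rfl
          rw [htake, pvLastPrefix_append_of_ne _ _ hc]

-- ===== VERDICT (by name: the statement is the Claim_ definition above) =====
theorem createPath_spec : Claim_equal_createPath := by
  intro output _
  unfold Spec_createPath createPath createPath_alt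
  have hsplit : PySem.Chars.split? output.toList ['/'] = some (PySem.Chars.splitOn output.toList ['/']) := by
    simp [PySem.Chars.split?]
  rw [hsplit]
  simp only [Option.getD_some, PySem.List.slice_to_neg_one, pvSplitOn_eq]
  rw [pvFold_eq_flatten, pvFlatten_split1]
  have hge := pvRfindGo_ge output.toList output.toList.length
  have hb : (0 : Int) ≤ PySem.Chars.rfind output.toList ['/'] + 1 := by
    unfold PySem.Chars.rfind; omega
  rw [PySem.List.slice_to _ hb]
  have := pvTake_rfindGo output.toList output.toList.length
  rw [PySem.Chars.rfind, this, List.take_of_length_le (by omega)]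
  split_ifs with hm
  · simp
  · rw [pvLastPrefix_eq_nil _ hm]
    simp
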